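-- pv_equiv track=rewrite | github.com/voka/Backjoon | 20211129/pro_hash_table3.py | solution
-- ===== SOURCE A (Python) =====
-- def solution(genres, plays):
--     mymusic = {} # genres, "횟수 , 고유번호"
--     musicpopulur = {} # 장르 횟수
--     for i in range(len(genres)):
--         if genres[i] in mymusic:
--             mymusic[genres[i]].append([plays[i],i])
--         else:
--             mymusic[genres[i]] = []
--             mymusic[genres[i]].append([plays[i],i])
--         if genres[i] in musicpopulur:
--             musicpopulur[genres[i]] += plays[i]
--         else:
--             musicpopulur[genres[i]] = plays[i]
--     ss = sorted(musicpopulur.items(), key = lambda item : item[1] ,reverse=True ) # 딕셔너리 정렬해서 튜플리스트로 만드는 것도 외워둘 것 !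
--
--     answer = []
--     for i in ss:
--         mymusic[i[0]].sort(key=lambda x : (x[0],-x[1]), reverse=True) # 요런식으로 정렬함수 사용하면 n 차원도 정렬할 수 있을거 같다. 유용 !!!
--         answer.append(mymusic[i[0]][0][1])
--         if(len(mymusic[i[0]]) > 1) : answer.append(mymusic[i[0]][1][1])
--
--     return answer
-- ===== SOURCE B (Python) =====
-- def solution(genres, plays):
--     totals = {}   # genre -> total plays
--     best = {}     # genre -> (play, -index) of the most-played song
--     second = {}   # genre -> (play, -index) of the runner-up, if any
--     for i, (g, p) in enumerate(zip(genres, plays)):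
--         totals[g] = totals.get(g, 0) + p
--         cand = (p, -i)
--         if g not in best:
--             best[g] = cand
--         elif cand > best[g]:
--             second[g] = best[g]
--             best[g] = cand
--         elif g not in second or cand > second[g]:
--             second[g] = cand
--     answer = []
--     for g in sorted(totals, key=totals.get, reverse=True):
--         answer.append(-best[g][1])
--         if g in second:
--             answer.append(-second[g][1])
--     return answer
-- ===== Notes on version B (the rewrite author's own statement) =====
-- stated objective: alternative
-- what changed: B replaces A's per-genre full sort of every song list by a single linear pass that maintains each genre's running total and top-2 songs in dictionaries, so only the genre totals are still sorted.
-- outside the precondition, e.g. on solution(['a', 'b'], [1]): A raises IndexError, B returns [0]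
import Mathlib
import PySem

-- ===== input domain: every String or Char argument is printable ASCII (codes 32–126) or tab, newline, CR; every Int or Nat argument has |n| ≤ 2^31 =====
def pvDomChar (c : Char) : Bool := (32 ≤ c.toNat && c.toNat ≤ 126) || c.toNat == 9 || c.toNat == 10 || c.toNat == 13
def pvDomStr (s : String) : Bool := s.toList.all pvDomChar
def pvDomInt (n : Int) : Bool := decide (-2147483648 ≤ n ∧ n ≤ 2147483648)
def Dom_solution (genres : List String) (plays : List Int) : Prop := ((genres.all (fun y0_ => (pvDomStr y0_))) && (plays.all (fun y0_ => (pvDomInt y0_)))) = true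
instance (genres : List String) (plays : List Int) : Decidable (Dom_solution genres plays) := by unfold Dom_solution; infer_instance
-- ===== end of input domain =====

-- B replaces A's per-genre full sort by a single-pass top-2 selection per genre
-- (only the genre totals are still sorted): a different algorithm of similar cost.

-- ===== PORT A =====
def solution (genres : List String) (plays : List Int) : List Int :=
  let st := (PySem.List.pyRange 0 genres.length 1).foldl
    (fun (st : PySem.Dict String (List (Int × Int)) × PySem.Dict String Int) i =>
      -- pyGetD is exact here: inside Pre_ every i of range(len(genres)) is in range of both lists
      let g := PySem.List.pyGetD genres i ""
      let p := PySem.List.pyGetD plays i 0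
      let mymusic :=
        if st.1.contains g then st.1.insert g (st.1.getD g [] ++ [(p, i)])
        else (st.1.insert g []).insert g ((st.1.insert g []).getD g [] ++ [(p, i)])
      let pop := if st.2.contains g then st.2.insert g (st.2.getD g 0 + p) else st.2.insert g p
      (mymusic, pop))
    (PySem.Dict.empty, PySem.Dict.empty)
  let ss := PySem.List.sorted st.2.items (fun it => it.2) true
  -- Python sorts mymusic[g] in place; each key of ss occurs once, so recomputing the sort is exact
  ss.foldl (fun answer it =>
      let lst := PySem.List.sorted2 (st.1.getD it.1 []) (fun x => x.1) (fun x => -x.2) true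
      -- lst is never empty for a key of ss, so the default of pyGetD is never used
      let answer := answer ++ [(PySem.List.pyGetD lst 0 (0, 0)).2]
      if 1 < (lst.length : Int) then answer ++ [(PySem.List.pyGetD lst 1 (0, 0)).2] else answer)
    []

-- ===== PORT B =====
-- Python tuple comparison (p, -i) > (p', -i') on Int pairs
def pvLexGt (c d : Int × Int) : Bool := decide (d.1 < c.1) || (c.1 == d.1 && decide (d.2 < c.2))

-- loop body for the best/second dicts (B's single-pass top-2 selection)
def pvUpd (e : Int × String × Int)
    (bs : PySem.Dict String (Int × Int) × PySem.Dict String (Int × Int)) :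
    PySem.Dict String (Int × Int) × PySem.Dict String (Int × Int) :=
  let cand : Int × Int := (e.2.2, -e.1)
  match bs.1.get? e.2.1 with
  | none => (bs.1.insert e.2.1 cand, bs.2)
  | some b =>
    if pvLexGt cand b then (bs.1.insert e.2.1 cand, bs.2.insert e.2.1 b)
    else
      match bs.2.get? e.2.1 with
      | none => (bs.1, bs.2.insert e.2.1 cand)
      | some s => if pvLexGt cand s then (bs.1, bs.2.insert e.2.1 cand) else bs

def solution_alt (genres : List String) (plays : List Int) : List Int :=
  let st := (PySem.List.enumerate (genres.zip plays)).foldl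
    (fun (st : PySem.Dict String Int ×
               PySem.Dict String (Int × Int) × PySem.Dict String (Int × Int)) e =>
      (st.1.insert e.2.1 (st.1.getD e.2.1 0 + e.2.2), pvUpd e st.2))
    (PySem.Dict.empty, PySem.Dict.empty, PySem.Dict.empty)
  let totals := st.1
  let best := st.2.1
  let second := st.2.2
  -- key=totals.get: exact as getD, every sorted key is a key of totals
  (PySem.List.sorted totals.keys (fun g => totals.getD g 0) true).foldl
    (fun answer g =>
      let answer := answer ++ [-(best.getD g (0, 0)).2]
      match second.get? g with
      | some s => answer ++ [-s.2]
      | none => answer)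
    []

-- ===== PRECONDITION & SPEC =====
-- Pre_ excludes only inputs where A raises IndexError: plays shorter than genres.
def Pre_solution (genres : List String) (plays : List Int) : Prop :=
  genres.length ≤ plays.length
instance (genres : List String) (plays : List Int) : Decidable (Pre_solution genres plays) := by
  unfold Pre_solution; infer_instance
def pvWitness_solution : List String × List Int := (["pop", "rock", "pop"], [500, 600, 150])

def Spec_solution (genres : List String) (plays : List Int) (out : List Int) : Prop := out = solution_alt genres plays
instance (genres : List String) (plays : List Int) (out : List Int) : Decidable (Spec_solution genres plays out) := by unfold Spec_solution; infer_instance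

-- ===== CLAIM (what is proved, stated in full; the proofs are below) =====
def Claim_equal_solution : Prop := ∀ (genres : List String) (plays : List Int), Dom_solution genres plays → Pre_solution genres plays → Spec_solution genres plays (solution genres plays)

-- ===== LEMMAS AND PROOFS =====

-- abbreviations for the proof
def pvCand (e : Int × String × Int) : Int × Int := (e.2.2, -e.1)
def pvNeg2 (c : Int × Int) : Int × Int := (c.1, -c.2)

-- pure top-2 step in (p, -i) space
def pvStep (bs : Option (Int × Int) × Option (Int × Int)) (c : Int × Int) :
    Option (Int × Int) × Option (Int × Int) :=
  match bs.1 with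
  | none => (some c, bs.2)
  | some b =>
    if pvLexGt c b then (some c, some b)
    else
      match bs.2 with
      | none => (bs.1, some c)
      | some s => if pvLexGt c s then (bs.1, some c) else bs

theorem pvInsertBy_head2 (c : Int × Int) (acc : List (Int × Int)) :
    ((PySem.List.insertBy pvLexGt c acc)[0]?, (PySem.List.insertBy pvLexGt c acc)[1]?) =
      pvStep (acc[0]?, acc[1]?) c := by
  match acc with
  | [] => simp [PySem.List.insertBy, pvStep]
  | [y] =>
    by_cases h : pvLexGt c y <;> simp [PySem.List.insertBy, pvStep, h]
  | y :: z :: t =>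
    by_cases h : pvLexGt c y
    · simp [PySem.List.insertBy, pvStep, h]
    · by_cases h2 : pvLexGt c z <;> simp [PySem.List.insertBy, pvStep, h, h2]

theorem pvTop2_invariant (cs : List (Int × Int)) (acc : List (Int × Int)) :
    ((cs.foldl (fun a x => PySem.List.insertBy pvLexGt x a) acc)[0]?,
     (cs.foldl (fun a x => PySem.List.insertBy pvLexGt x a) acc)[1]?) =
      cs.foldl pvStep (acc[0]?, acc[1]?) := by
  induction cs generalizing acc with
  | nil => simp
  | cons c cs ih =>
    simp only [List.foldl_cons]
    rw [ih, ← pvInsertBy_head2]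

theorem pvInsertBy_map {α β : Type} (f : α → β) (bf : β → β → Bool) (bg : α → α → Bool)
    (h : ∀ a b, bf (f a) (f b) = bg a b) (x : α) (ys : List α) :
    PySem.List.insertBy bf (f x) (ys.map f) = (PySem.List.insertBy bg x ys).map f := by
  induction ys with
  | nil => simp [PySem.List.insertBy]
  | cons y ys ih =>
    simp only [List.map_cons, PySem.List.insertBy, h]
    by_cases hb : bg x y <;> simp [hb, ih]

theorem pvFoldl_insertBy_map {α β : Type} (f : α → β) (bf : β → β → Bool) (bg : α → α → Bool)
    (h : ∀ a b, bf (f a) (f b) = bg a b) (cs : List α) (acc : List α) :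
    (cs.map f).foldl (fun a x => PySem.List.insertBy bf x a) (acc.map f) =
      (cs.foldl (fun a x => PySem.List.insertBy bg x a) acc).map f := by
  induction cs generalizing acc with
  | nil => simp
  | cons c cs ih =>
    simp only [List.map_cons, List.foldl_cons]
    rw [pvInsertBy_map f bf bg h, ih]

theorem pvLength_insertBy {α : Type} (bf : α → α → Bool) (x : α) (ys : List α) :
    (PySem.List.insertBy bf x ys).length = ys.length + 1 := by
  induction ys with
  | nil => simp [PySem.List.insertBy]
  | cons y ys ih =>
    simp only [PySem.List.insertBy]
    by_cases hb : bf x y <;> simp [hb, ih]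

theorem pvUpd_project (l : List (Int × String × Int)) (g : String)
    (db ds : PySem.Dict String (Int × Int)) :
    ((l.foldl (fun bs e => pvUpd e bs) (db, ds)).1.get? g,
     (l.foldl (fun bs e => pvUpd e bs) (db, ds)).2.get? g) =
      ((l.filter (fun e => e.2.1 == g)).map pvCand).foldl pvStep (db.get? g, ds.get? g) := by
  induction l generalizing db ds with
  | nil => simp
  | cons e l ih =>
    simp only [List.foldl_cons, List.filter_cons]
    by_cases hg : e.2.1 = g
    · subst hg
      simp only [beq_self_eq_true, if_pos, List.map_cons, List.foldl_cons]
      have hpair : pvUpd e (db, ds) = ((pvUpd e (db, ds)).1, (pvUpd e (db, ds)).2) := rfl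
      rw [hpair, ih]
      congr 1
      unfold pvUpd pvStep pvCand
      cases hb : db.get? e.2.1 with
      | none => simp [PySem.Dict.get?_insert_self]
      | some b =>
        by_cases h1 : pvLexGt (e.2.2, -e.1) b
        · simp [h1, PySem.Dict.get?_insert_self]
        · cases hs : ds.get? e.2.1 with
          | none => simp [hb, h1, PySem.Dict.get?_insert_self]
          | some s =>
            by_cases h2 : pvLexGt (e.2.2, -e.1) s <;>
              simp [hb, h1, hs, h2, PySem.Dict.get?_insert_self]
    · have hbeq : (e.2.1 == g) = false := beq_false_of_ne hg
      simp only [hbeq, if_neg, Bool.false_eq_true, not_false_iff]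
      have hpair : pvUpd e (db, ds) = ((pvUpd e (db, ds)).1, (pvUpd e (db, ds)).2) := rfl
      rw [hpair, ih]
      have hne : g ≠ e.2.1 := Ne.symm hg
      have h1 : (pvUpd e (db, ds)).1.get? g = db.get? g := by
        unfold pvUpd
        cases hb : db.get? e.2.1 with
        | none => simp [PySem.Dict.get?_insert, hne]
        | some b =>
          by_cases hx : pvLexGt (e.2.2, -e.1) b
          · simp [hx, PySem.Dict.get?_insert, hne]
          · cases hs : ds.get? e.2.1 with
            | none => simp [hx]
            | some s => by_cases h2 : pvLexGt (e.2.2, -e.1) s <;> simp [hx, h2]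
      have h2 : (pvUpd e (db, ds)).2.get? g = ds.get? g := by
        unfold pvUpd
        cases hb : db.get? e.2.1 with
        | none => simp
        | some b =>
          by_cases hx : pvLexGt (e.2.2, -e.1) b
          · simp [hx, PySem.Dict.get?_insert, hne]
          · cases hs : ds.get? e.2.1 with
            | none => simp [hx, PySem.Dict.get?_insert, hne]
            | some s => by_cases h2 : pvLexGt (e.2.2, -e.1) s <;>
                simp [hx, h2, PySem.Dict.get?_insert, hne]
      rw [h1, h2]

theorem pvFoldl_insertBy_length {α : Type} (bf : α → α → Bool) (cs acc : List α) :
    (cs.foldl (fun a x => PySem.List.insertBy bf x a) acc).length = acc.length + cs.length := by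
  induction cs generalizing acc with
  | nil => simp
  | cons c cs ih => simp [ih, pvLength_insertBy]; omega

-- per-genre: first two entries of the descending sort = the single-pass top-2 pair
theorem pvChunk_eq (cands : List (Int × Int)) (hne : cands ≠ [])
    (b2 : Option (Int × Int) × Option (Int × Int))
    (hb2 : b2 = cands.foldl pvStep (none, none)) :
    [(PySem.List.pyGetD (PySem.List.sorted2 (cands.map pvNeg2) (fun x => x.1) (fun x => -x.2) true) 0 (0, 0)).2] ++
      (if 1 < ((PySem.List.sorted2 (cands.map pvNeg2) (fun x => x.1) (fun x => -x.2) true).length : Int) then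
        [(PySem.List.pyGetD (PySem.List.sorted2 (cands.map pvNeg2) (fun x => x.1) (fun x => -x.2) true) 1 (0, 0)).2]
      else []) =
    [-(b2.1.getD (0, 0)).2] ++ (match b2.2 with | some s => [-s.2] | none => []) := by
  have hbefore : ∀ a b : Int × Int,
      (decide ((pvNeg2 b).1 < (pvNeg2 a).1) ||
        (!decide ((pvNeg2 a).1 < (pvNeg2 b).1) && decide (-(pvNeg2 b).2 < -(pvNeg2 a).2))) = pvLexGt a b := by
    intro a b
    simp only [pvNeg2, pvLexGt, neg_neg]
    by_cases h1 : b.1 < a.1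
    · simp [h1]
    · by_cases h2 : a.1 < b.1
      · have : ¬ (a.1 == b.1) = true := by simp; omega
        simp [h1, h2, this]
      · have he : (a.1 == b.1) = true := by simp; omega
        simp [h1, h2, he]
  have hS : PySem.List.sorted2 (cands.map pvNeg2) (fun x => x.1) (fun x => -x.2) true =
      (cands.foldl (fun a x => PySem.List.insertBy pvLexGt x a) []).map pvNeg2 := by
    show (cands.map pvNeg2).foldl
        (fun acc x => PySem.List.insertBy
          (fun a b => decide (b.1 < a.1) || (!decide (a.1 < b.1) && decide (-b.2 < -a.2))) x acc) [] = _
    have := pvFoldl_insertBy_map pvNeg2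
      (fun a b => decide (b.1 < a.1) || (!decide (a.1 < b.1) && decide (-b.2 < -a.2)))
      pvLexGt hbefore cands []
    simpa using this
  set S := cands.foldl (fun a x => PySem.List.insertBy pvLexGt x a) [] with hSdef
  have hinv : (S[0]?, S[1]?) = b2 := by
    rw [hb2, hSdef]
    simpa using pvTop2_invariant cands []
  have hlen : S.length = cands.length := by
    simpa using pvFoldl_insertBy_length pvLexGt cands []
  have hSne : S ≠ [] := by
    intro h
    apply hne
    have := hlen
    rw [h] at this
    exact List.eq_nil_of_length_eq_zero this.symm
  match S, hS, hinv, hSne with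
  | [], _, _, hSne => exact absurd rfl hSne
  | b :: rest, hS, hinv, _ =>
    have hb1 : b2.1 = some b := by rw [← hinv]; simp
    have hb2' : b2.2 = rest[0]? := by rw [← hinv]; rfl
    rw [hS, hb1]
    match rest with
    | [] =>
      rw [hb2']
      simp [PySem.List.pyGetD_ofNat', pvNeg2]
    | s :: t =>
      rw [hb2']
      simp only [List.map_cons, List.getElem?_cons_zero]
      rw [if_pos (by simp)]
      simp [PySem.List.pyGetD_ofNat', pvNeg2]

-- ===== VERDICT (by name: the statement is the Claim_ definition above) =====
theorem solution_spec : Claim_equal_solution := by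
  intro genres plays _hdom hpre
  unfold Pre_solution at hpre
  unfold Spec_solution solution solution_alt
  -- Step 1: A's index loop is the loop over the enumerated zip
  have hlen : PySem.List.len (genres.zip plays) = (genres.length : Int) := by
    simp [PySem.List.len, List.length_zip]; omega
  have hstep1 :
      (PySem.List.pyRange 0 genres.length 1).foldl
        (fun (st : PySem.Dict String (List (Int × Int)) × PySem.Dict String Int) i =>
          let g := PySem.List.pyGetD genres i ""
          let p := PySem.List.pyGetD plays i 0
          let mymusic :=
            if st.1.contains g then st.1.insert g (st.1.getD g [] ++ [(p, i)])
            else (st.1.insert g []).insert g ((st.1.insert g []).getD g [] ++ [(p, i)])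
          let pop := if st.2.contains g then st.2.insert g (st.2.getD g 0 + p) else st.2.insert g p
          (mymusic, pop))
        (PySem.Dict.empty, PySem.Dict.empty) =
      (PySem.List.enumerate (genres.zip plays)).foldl
        (fun (st : PySem.Dict String (List (Int × Int)) × PySem.Dict String Int) e =>
          (if st.1.contains e.2.1 then st.1.insert e.2.1 (st.1.getD e.2.1 [] ++ [(e.2.2, e.1)])
           else (st.1.insert e.2.1 []).insert e.2.1
             ((st.1.insert e.2.1 []).getD e.2.1 [] ++ [(e.2.2, e.1)]),
           if st.2.contains e.2.1 then st.2.insert e.2.1 (st.2.getD e.2.1 0 + e.2.2)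
           else st.2.insert e.2.1 e.2.2))
        (PySem.Dict.empty, PySem.Dict.empty) := by
    rw [PySem.List.enumerate_eq_map_pyRange (genres.zip plays) ("", 0), hlen, List.foldl_map]
    apply PySem.List.foldl_congr_mem
    intro acc i hi
    rw [PySem.List.mem_pyRange_one] at hi
    have hig : i < (genres.length : Int) := hi.2
    have hg : PySem.List.pyGetD (genres.zip plays) i ("", 0) =
        (PySem.List.pyGetD genres i "", PySem.List.pyGetD plays i 0) := by
      rw [PySem.List.pyGetD_eq_getElem _ _ hi.1 (by simp [List.length_zip]; omega),
          PySem.List.pyGetD_eq_getElem _ _ hi.1 (by omega),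
          PySem.List.pyGetD_eq_getElem _ _ hi.1 (by omega)]
      exact List.getElem_zip ..
    simp only [hg]
  rw [hstep1]
  -- Step 2: normalize both loop bodies to product form and split the folds
  have hstep2 :
      (PySem.List.enumerate (genres.zip plays)).foldl
        (fun (st : PySem.Dict String (List (Int × Int)) × PySem.Dict String Int) e =>
          (if st.1.contains e.2.1 then st.1.insert e.2.1 (st.1.getD e.2.1 [] ++ [(e.2.2, e.1)])
           else (st.1.insert e.2.1 []).insert e.2.1
             ((st.1.insert e.2.1 []).getD e.2.1 [] ++ [(e.2.2, e.1)]),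
           if st.2.contains e.2.1 then st.2.insert e.2.1 (st.2.getD e.2.1 0 + e.2.2)
           else st.2.insert e.2.1 e.2.2))
        (PySem.Dict.empty, PySem.Dict.empty) =
      (PySem.List.enumerate (genres.zip plays)).foldl
        (fun (st : PySem.Dict String (List (Int × Int)) × PySem.Dict String Int) e =>
          (st.1.insert e.2.1 (st.1.getD e.2.1 [] ++ [(e.2.2, e.1)]),
           st.2.insert e.2.1 (st.2.getD e.2.1 0 + e.2.2)))
        (PySem.Dict.empty, PySem.Dict.empty) := by
    apply PySem.List.foldl_congr_mem
    intro acc e _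
    congr 1
    · by_cases h : acc.1.contains e.2.1
      · simp [h]
      · rw [if_neg h, PySem.Dict.insert_insert_self,
          PySem.Dict.getD_insert_self, PySem.Dict.getD_of_not_contains _ _ (by simp [h])]
    · by_cases h : acc.2.contains e.2.1
      · simp [h]
      · rw [if_neg h, PySem.Dict.getD_of_not_contains _ _ (by simp [h])]
        simp
  rw [hstep2]
  simp only []
  rw [PySem.List.foldl_prod_mk
    (f := fun (d : PySem.Dict String (List (Int × Int))) (e : Int × String × Int) =>
      d.insert e.2.1 (d.getD e.2.1 [] ++ [(e.2.2, e.1)]))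
    (g := fun (d : PySem.Dict String Int) (e : Int × String × Int) =>
      d.insert e.2.1 (d.getD e.2.1 0 + e.2.2))]
  rw [PySem.List.foldl_prod_mk
    (f := fun (d : PySem.Dict String Int) (e : Int × String × Int) =>
      d.insert e.2.1 (d.getD e.2.1 0 + e.2.2))
    (g := fun (bs : PySem.Dict String (Int × Int) × PySem.Dict String (Int × Int))
        (e : Int × String × Int) => pvUpd e bs)]
  simp only []
  -- names for the three folds
  set L := PySem.List.enumerate (genres.zip plays) with hL
  set M := L.foldl (fun (d : PySem.Dict String (List (Int × Int))) (e : Int × String × Int) =>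
      d.insert e.2.1 (d.getD e.2.1 [] ++ [(e.2.2, e.1)])) PySem.Dict.empty with hM
  set T := L.foldl (fun (d : PySem.Dict String Int) (e : Int × String × Int) =>
      d.insert e.2.1 (d.getD e.2.1 0 + e.2.2)) PySem.Dict.empty with hT
  set BS := L.foldl (fun (bs : PySem.Dict String (Int × Int) × PySem.Dict String (Int × Int))
      (e : Int × String × Int) => pvUpd e bs) (PySem.Dict.empty, PySem.Dict.empty) with hBS
  -- keys of the totals dict
  have hkeysT : T.keys = PySem.Set.ofList (L.map (fun e => e.2.1)) := by
    rw [hT, PySem.Dict.keys_foldl_insert_key L (fun e => e.2.1)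
      (fun d e => d.getD e.2.1 0 + e.2.2) PySem.Dict.empty]
    rfl
  have hnodup : T.keys.Nodup := by
    rw [hT]
    exact PySem.Dict.nodup_keys_foldl_insert_key L (fun e => e.2.1)
      (fun d e => d.getD e.2.1 0 + e.2.2) PySem.Dict.empty (by simp)
  -- the genre groups collected by A
  have hMget : ∀ k : String, M.getD k [] =
      (L.filter (fun e => e.2.1 == k)).map (fun e => (e.2.2, e.1)) := by
    intro k
    have hmod : M = (L.map (fun e => (e.2.1, ((e.2.2 : Int), e.1)))).foldl
        (fun d p => d.modify p.1 [] (fun x => x ++ [p.2])) PySem.Dict.empty := by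
      rw [List.foldl_map]
      rfl
    rw [hmod, PySem.Dict.getD_foldl_modify_append]
    simp [List.filter_map, List.map_map, Function.comp_def]
  -- the best/second dicts projected at one key
  have hproj : ∀ k : String, (BS.1.get? k, BS.2.get? k) =
      ((L.filter (fun e => e.2.1 == k)).map pvCand).foldl pvStep (none, none) := by
    intro k
    rw [hBS]
    have := pvUpd_project L k PySem.Dict.empty PySem.Dict.empty
    simpa using this
  -- A's sorted items list is B's sorted key list, paired with the totals
  have hss : PySem.List.sorted T.items (fun it => it.2) true =
      (PySem.List.sorted T.keys (fun g => T.getD g 0) true).map (fun k => (k, T.getD k 0)) := by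
    rw [PySem.Dict.items_eq_map_keys T hnodup 0,
       PySem.List.sorted_rev_eq_foldl_insertBy, PySem.List.sorted_rev_eq_foldl_insertBy]
    have := pvFoldl_insertBy_map (fun k => (k, T.getD k 0))
      (fun a b => decide (b.2 < a.2))
      (fun a b => decide (T.getD b 0 < T.getD a 0))
      (fun _ _ => rfl) T.keys []
    simpa using this
  rw [hss, List.foldl_map]
  -- finally, compare the two answer loops key by key
  apply PySem.List.foldl_congr_mem
  intro acc k hk
  have hkT : k ∈ T.keys := by
    rw [← PySem.List.mem_sorted T.keys (fun g => T.getD g 0) true]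
    exact hk
  have hex : ∃ e ∈ L, e.2.1 = k := by
    rw [hkeysT, PySem.Set.mem_ofList] at hkT
    obtain ⟨e, he, hek⟩ := List.mem_map.mp hkT
    exact ⟨e, he, hek⟩
  have hne : (L.filter (fun e => e.2.1 == k)).map pvCand ≠ [] := by
    obtain ⟨e, he, hek⟩ := hex
    have : e ∈ L.filter (fun e => e.2.1 == k) := List.mem_filter.mpr ⟨he, by simp [hek]⟩
    intro h
    rw [List.map_eq_nil_iff] at h
    rw [h] at this
    exact absurd this (List.not_mem_nil)
  have hMk : M.getD k [] = ((L.filter (fun e => e.2.1 == k)).map pvCand).map pvNeg2 := by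
    rw [hMget k, List.map_map]
    apply List.map_congr_left
    intro e _
    simp [pvNeg2, pvCand]
  have chEq := pvChunk_eq ((L.filter (fun e => e.2.1 == k)).map pvCand) hne
    (BS.1.get? k, BS.2.get? k) (hproj k)
  rw [← hMk] at chEq
  have hL2 : (if 1 < ((PySem.List.sorted2 (M.getD k []) (fun x => x.1) (fun x => -x.2) true).length : Int) then
        acc ++ [(PySem.List.pyGetD (PySem.List.sorted2 (M.getD k []) (fun x => x.1) (fun x => -x.2) true) 0 (0, 0)).2]
          ++ [(PySem.List.pyGetD (PySem.List.sorted2 (M.getD k []) (fun x => x.1) (fun x => -x.2) true) 1 (0, 0)).2]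
      else acc ++ [(PySem.List.pyGetD (PySem.List.sorted2 (M.getD k []) (fun x => x.1) (fun x => -x.2) true) 0 (0, 0)).2]) =
      acc ++ ([(PySem.List.pyGetD (PySem.List.sorted2 (M.getD k []) (fun x => x.1) (fun x => -x.2) true) 0 (0, 0)).2]
        ++ (if 1 < ((PySem.List.sorted2 (M.getD k []) (fun x => x.1) (fun x => -x.2) true).length : Int) then
              [(PySem.List.pyGetD (PySem.List.sorted2 (M.getD k []) (fun x => x.1) (fun x => -x.2) true) 1 (0, 0)).2]
            else [])) := by
    split_ifs <;> simp
  have hR2 : (match BS.2.get? k with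
      | some s => acc ++ [-(BS.1.getD k (0, 0)).2] ++ [-s.2]
      | none => acc ++ [-(BS.1.getD k (0, 0)).2]) =
      acc ++ ([-(((BS.1.get? k)).getD (0, 0)).2] ++
        (match BS.2.get? k with | some s => [-s.2] | none => [])) := by
    rw [PySem.Dict.getD_eq_get?_getD]
    cases BS.2.get? k <;> simp
  rw [hL2, hR2, chEq]
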